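-- pv_equiv track=rewrite | github.com/Blazkowiz47/ISIC-2017 | utils/Encryption.py | generate_pob_values
-- ===== SOURCE A (Python) =====
-- def generate_pob_values(n:int = 10,r:int = 5) -> list:
--     '''
--         Consider n = 10
--         and r = 5
--     '''
--     pob_values = []
--     B = ''
--     done = False
--
--     for i in range(n):
--         B += '1' if i <= r-1 else '0'
--
--     B = list(B)
--
--     while not done:
--         pob_values.append(int(''.join(B),2))
--         no_of_zeros , i , j = 0, 0 , 1
--         while B[j] == '1' or B[i] == '0':
--             if B[i] == '0':
--                 no_of_zeros += 1
--             if j == n-1: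
--                 done = True
--                 break
--             i = j
--             j += 1
--         B[j] = '1'
--         j = i - no_of_zeros
--         while i >= j:
--             B[i] = '0'
--             i -= 1
--         while i >= 0:
--             B[i] = '1'
--             i -= 1
--
--     return pob_values
-- ===== SOURCE B (Python) =====
-- def generate_pob_values(n: int = 10, r: int = 5) -> list:
--     # Bottom-up: rows[j] holds the numbers with j ones among m bits, grouped by
--     # last bit (last bit 0 first, then last bit 1) - exactly A's order.  Only
--     # rows j >= k - (n - m) can still feed row k, so the others are skipped.
--     k = min(max(r, 0), n)
--     if k < 0:
--         return []
--     if k == 0: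
--         return [0]
--     rows = [[0]] + [[] for _ in range(k)]
--     for m in range(1, n + 1):
--         lo = max(1, k - (n - m))
--         for j in range(min(k, m), lo - 1, -1):
--             rows[j] = [2 * v for v in rows[j]] + [2 * v + 1 for v in rows[j - 1]]
--     return rows[k]
-- ===== Notes on version B (the rewrite author's own statement) =====
-- stated objective: simpler
-- what changed: A builds the bit strings one by one with an in-place successor-stepping scan over a mutable character list and re-parses each string with int(...,2); B computes the values directly by an iterative bottom-up recurrence on (bits m, ones j) grouped by the last bit (restricted to the rows that can still feed row k), which reproduces A's exact order with no string manipulation at all.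
import Mathlib
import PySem

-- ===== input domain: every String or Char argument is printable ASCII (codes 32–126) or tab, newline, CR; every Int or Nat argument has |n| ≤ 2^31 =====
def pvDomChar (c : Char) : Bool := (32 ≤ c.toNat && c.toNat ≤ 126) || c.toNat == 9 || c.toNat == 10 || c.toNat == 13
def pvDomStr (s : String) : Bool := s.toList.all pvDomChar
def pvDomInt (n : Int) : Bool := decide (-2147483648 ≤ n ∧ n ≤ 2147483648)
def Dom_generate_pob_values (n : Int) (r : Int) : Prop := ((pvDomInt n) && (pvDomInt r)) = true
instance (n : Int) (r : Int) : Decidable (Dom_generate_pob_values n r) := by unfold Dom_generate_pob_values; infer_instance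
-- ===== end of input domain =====

-- B replaces A's in-place successor-stepping over a mutable bit string by a short
-- structural recursion on (bits, ones) grouped by the last bit (objective: simpler).

-- ===== PORT A =====
-- int(''.join(B), 2): exact here because A only ever stores '0'/'1' characters in B
def pvBin (B : List Char) : Int :=
  B.foldl (fun a c => 2 * a + (if c = '1' then 1 else 0)) 0

-- for i in range(n): B += '1' if i <= r-1 else '0'
def pvBuildB (n r : Int) : List Char :=
  (PySem.List.pyRange 0 n 1).map (fun i => if i ≤ r - 1 then '1' else '0')

-- B[i]; in-range on every input admitted by Pre_, so the default is never read there
def pvGetC (B : List Char) (i : Int) : Char := PySem.List.pyGetD B i ' '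

-- B[i] = c; every index A assigns to is ≥ 0 (j ≥ 1; i ≥ j2 = i - no_of_zeros ≥ 0), so no wraparound
def pvSetC (B : List Char) (i : Int) (c : Char) : List Char :=
  if 0 ≤ i then B.set i.toNat c else B

-- inner scan: while B[j]=='1' or B[i]=='0'; fuel only makes the while-loop total
def pvScan (B : List Char) (n : Int) : Nat → Int → Int → Int → (Int × Int × Int × Bool)
  | 0, noz, i, j => (noz, i, j, true)
  | fuel + 1, noz, i, j =>
    if pvGetC B j = '1' ∨ pvGetC B i = '0' then
      let noz' := if pvGetC B i = '0' then noz + 1 else noz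
      if j = n - 1 then (noz', i, j, true)
      else pvScan B n fuel noz' j (j + 1)
    else (noz, i, j, false)

-- while i >= j: B[i] = '0'; i -= 1
def pvZeroLoop : Nat → List Char → Int → Int → (List Char × Int)
  | 0, B, i, _ => (B, i)
  | fuel + 1, B, i, j =>
    if j ≤ i then pvZeroLoop fuel (pvSetC B i '0') (i - 1) j else (B, i)

-- while i >= 0: B[i] = '1'; i -= 1
def pvOneLoop : Nat → List Char → Int → List Char
  | 0, B, _ => B
  | fuel + 1, B, i =>
    if 0 ≤ i then pvOneLoop fuel (pvSetC B i '1') (i - 1) else B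

-- while not done: …; fuel 2^n bounds the number of emitted values (C(n,·) ≤ 2^n)
def pvLoop (n : Int) : Nat → List Char → List Int
  | 0, _ => []
  | fuel + 1, B =>
    let v := pvBin B
    let s := pvScan B n (n.toNat + 1) 0 0 1
    let B1 := pvSetC B s.2.2.1 '1'
    let j2 := s.2.1 - s.1
    let zr := pvZeroLoop ((s.2.1 - j2).toNat + 1) B1 s.2.1 j2
    let B3 := pvOneLoop (zr.2.toNat + 1) zr.1 zr.2
    if s.2.2.2 then [v] else v :: pvLoop n fuel B3

def generate_pob_values (n : Int) (r : Int) : List Int :=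
  pvLoop n (2 ^ n.toNat) (pvBuildB n r)

-- ===== PORT B =====
-- inner loop: for j in range(min(k, m), lo - 1, -1): rows[j] = [2v] + [2v+1]
def pvInnerLoop (lo : Nat) : Nat → List (List Int) → List (List Int)
  | 0, rows => rows
  | j + 1, rows =>
    if j + 1 < lo then rows
    else
      pvInnerLoop lo j (rows.set (j + 1)
        (((rows.getD (j + 1) []).map (fun v => 2 * v))
          ++ ((rows.getD j []).map (fun v => 2 * v + 1))))

-- outer loop: for m in range(1, n + 1): …
def pvOuterLoop (kN nN : Nat) (rows0 : List (List Int)) : Nat → List (List Int)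
  | 0 => rows0
  | m + 1 => pvInnerLoop (max 1 (kN - (nN - (m + 1)))) (min kN (m + 1))
      (pvOuterLoop kN nN rows0 m)

def generate_pob_values_alt (n : Int) (r : Int) : List Int :=
  let k := min (max r 0) n
  if k < 0 then []
  else if k = 0 then [0]
  else
    (pvOuterLoop k.toNat n.toNat ([[(0 : Int)]] ++ List.replicate k.toNat []) n.toNat).getD
      k.toNat []

-- ===== PRECONDITION & SPEC =====
-- A raises for n ≤ 1 (ValueError on int('',2) for n ≤ 0, IndexError on B[1] for n = 1);
-- Pre_ admits exactly the inputs on which A returns.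
def Pre_generate_pob_values (n : Int) (r : Int) : Prop := 2 ≤ n
instance (n : Int) (r : Int) : Decidable (Pre_generate_pob_values n r) := by
  unfold Pre_generate_pob_values; infer_instance

def pvWitness_generate_pob_values : Int × Int := (4, 2)

def Spec_generate_pob_values (n : Int) (r : Int) (out : List Int) : Prop := out = generate_pob_values_alt n r
instance (n : Int) (r : Int) (out : List Int) : Decidable (Spec_generate_pob_values n r out) := by
  unfold Spec_generate_pob_values; infer_instance

-- ===== CLAIM (what is proved, stated in full; the proofs are below) =====
def Claim_equal_generate_pob_values : Prop := ∀ (n : Int) (r : Int), Dom_generate_pob_values n r → Pre_generate_pob_values n r → Spec_generate_pob_values n r (generate_pob_values n r)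


-- ===== LEMMAS AND PROOFS =====

-- reference recursion: the values with k ones among m bits, in A's order
def pvGen : Nat → Int → List Int
  | m, k =>
    if k < 0 ∨ (m : Int) < k then []
    else if k = 0 then [0]
    else
      match m with
      | 0 => []
      | m' + 1 => (pvGen m' k).map (fun v => 2 * v) ++ (pvGen m' (k - 1)).map (fun v => 2 * v + 1)

-- the sequence of bit strings A's loop visits, in order: length-m strings with k
-- ones, grouped by the last character ('0' group first)
def pvConfigs : Nat → Nat → List (List Char)
  | m, k =>
    if m < k then []
    else if k = 0 then [List.replicate m '0']
    else
      match m with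
      | 0 => []
      | m' + 1 =>
        (pvConfigs m' k).map (· ++ ['0']) ++ (pvConfigs m' (k - 1)).map (· ++ ['1'])

theorem pvConfigs_zero (m : Nat) : pvConfigs m 0 = [List.replicate m '0'] := by
  unfold pvConfigs; simp

theorem pvConfigs_big {m k : Nat} (h : m < k) : pvConfigs m k = [] := by
  unfold pvConfigs; simp [h]

theorem pvConfigs_succ (m k : Nat) (hk : k ≠ 0) :
    pvConfigs (m + 1) k = (pvConfigs m k).map (· ++ ['0']) ++ (pvConfigs m (k - 1)).map (· ++ ['1']) := by
  conv_lhs => unfold pvConfigs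
  by_cases h : m + 1 < k
  · simp [h, pvConfigs_big (by omega : m < k), pvConfigs_big (by omega : m < k - 1)]
  · simp [h, hk]

theorem pvConfigs_ne_nil {m k : Nat} (h : k ≤ m) : pvConfigs m k ≠ [] := by
  induction m generalizing k with
  | zero => interval_cases k <;> simp [pvConfigs_zero]
  | succ m ih =>
    rcases Nat.eq_zero_or_pos k with hk | hk
    · subst hk; simp [pvConfigs_zero]
    · rw [pvConfigs_succ m k (by omega)]
      rcases Nat.lt_or_ge m (k) with hmk | hmk
      · have : k - 1 ≤ m := by omega
        have := ih this
        intro hcon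
        rcases List.append_eq_nil_iff.1 hcon with ⟨_, h2⟩
        exact this (List.map_eq_nil_iff.1 h2)
      · have := ih hmk
        intro hcon
        rcases List.append_eq_nil_iff.1 hcon with ⟨h1, _⟩
        exact this (List.map_eq_nil_iff.1 h1)

theorem pvConfigs_length_le (m k : Nat) : (pvConfigs m k).length ≤ 2 ^ m := by
  induction m generalizing k with
  | zero =>
    rcases Nat.eq_zero_or_pos k with hk | hk
    · subst hk; simp [pvConfigs_zero]
    · simp [pvConfigs_big hk]
  | succ m ih =>
    rcases Nat.eq_zero_or_pos k with hk | hk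
    · subst hk; simp [pvConfigs_zero]; exact Nat.one_le_two_pow
    · rw [pvConfigs_succ m k (by omega)]
      have h1 := ih k
      have h2 := ih (k - 1)
      simp only [List.length_append, List.length_map]
      have : 2 ^ (m + 1) = 2 ^ m + 2 ^ m := by ring
      omega

theorem pvConfigs_concat {m k : Nat} (h : k ≤ m) :
    pvConfigs m k = (pvConfigs m k).dropLast
      ++ [List.replicate (m - k) '0' ++ List.replicate k '1'] := by
  induction m generalizing k with
  | zero => interval_cases k <;> simp [pvConfigs_zero]
  | succ m ih =>
    rcases Nat.eq_zero_or_pos k with hk | hk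
    · subst hk; simp [pvConfigs_zero]
    · rw [pvConfigs_succ m k (by omega)]
      have hA1 : pvConfigs m (k - 1) ≠ [] := pvConfigs_ne_nil (by omega)
      have hmap : (pvConfigs m (k - 1)).map (· ++ ['1']) ≠ [] := by simpa using hA1
      have h3 : (pvConfigs m (k - 1)).map (· ++ ['1'])
          = ((pvConfigs m (k - 1)).dropLast).map (· ++ ['1'])
            ++ [List.replicate (m + 1 - k) '0' ++ List.replicate k '1'] := by
        conv_lhs => rw [ih (k := k - 1) (by omega)]
        rw [List.map_append]
        congr 1
        simp only [List.map_cons, List.map_nil]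
        congr 1
        have h4 : m - (k - 1) = m + 1 - k := by omega
        have h5 : List.replicate (k - 1) '1' ++ ['1'] = List.replicate k '1' := by
          rw [← List.replicate_succ']; congr 1; omega
        rw [h4, List.append_assoc, h5]
      rw [List.dropLast_append_of_ne_nil hmap, h3, List.dropLast_concat,
        List.append_assoc]

theorem pvBin_append_zero (x : List Char) : pvBin (x ++ ['0']) = 2 * pvBin x := by
  simp [pvBin, List.foldl_append]

theorem pvBin_append_one (x : List Char) : pvBin (x ++ ['1']) = 2 * pvBin x + 1 := by
  simp [pvBin, List.foldl_append]

theorem pvBin_replicate_zero (m : Nat) : pvBin (List.replicate m '0') = 0 := by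
  induction m with
  | zero => simp [pvBin]
  | succ m ih => rw [List.replicate_succ', pvBin_append_zero, ih]; ring

theorem pvGen_nil {m : Nat} {k : Int} (h : (m : Int) < k) : pvGen m k = [] := by
  unfold pvGen; rw [if_pos (Or.inr h)]

theorem pvGen_zero (m : Nat) : pvGen m 0 = [0] := by
  unfold pvGen; simp

theorem pvGen_succ (m : Nat) (k : Int) (h0 : 0 < k) (h1 : k ≤ (m : Int) + 1) :
    pvGen (m + 1) k
      = (pvGen m k).map (fun v => 2 * v) ++ (pvGen m (k - 1)).map (fun v => 2 * v + 1) := by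
  conv_lhs => unfold pvGen
  rw [if_neg (by push_cast; omega), if_neg (by omega)]

theorem pvGen_eq_map {m k : Nat} (h : k ≤ m) :
    (pvConfigs m k).map pvBin = pvGen m (k : Int) := by
  induction m generalizing k with
  | zero =>
    interval_cases k
    simp [pvConfigs_zero, pvGen_zero, pvBin]
  | succ m ih =>
    rcases Nat.eq_zero_or_pos k with hk | hk
    · subst hk; simp [pvConfigs_zero, pvBin_replicate_zero, pvGen_zero]
    · rw [pvConfigs_succ m k (by omega),
        pvGen_succ m (k : Int) (by exact_mod_cast hk) (by exact_mod_cast h)]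
      have ecast : ((k : Int) - 1) = ((k - 1 : Nat) : Int) := by push_cast [hk]; omega
      have e0 : pvBin ∘ (· ++ ['0']) = (fun v => 2 * v) ∘ pvBin :=
        funext fun x => pvBin_append_zero x
      have e1 : pvBin ∘ (· ++ ['1']) = (fun v => 2 * v + 1) ∘ pvBin :=
        funext fun x => pvBin_append_one x
      rw [List.map_append, List.map_map, List.map_map, e0, e1,
        ← List.map_map, ← List.map_map]
      rcases Nat.lt_or_ge m k with hmk | hmk
      · have hk1 : k = m + 1 := by omega
        subst hk1
        rw [pvConfigs_big (by omega), pvGen_nil (by push_cast; omega)]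
        rw [ecast, ih (by omega)]
        simp
      · rw [ih hmk, ecast, ih (by omega)]

-- generic facts about a map-over-range row table
theorem pvGetD_map_range {α : Type} (N q : Nat) (f : Nat → α) (d : α) (hq : q < N) :
    ((List.range N).map f).getD q d = f q := by
  simp [List.getD, List.getElem?_map, List.getElem?_range, hq]

theorem pvSet_map_range {α : Type} (N p : Nat) (f : Nat → α) (v : α) :
    ((List.range N).map f).set p v
      = (List.range N).map (fun i => if i = p then v else f i) := by
  apply List.ext_getElem (by simp)
  intro i h1 h2
  simp only [List.getElem_set, List.getElem_map, List.getElem_range]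
  split_ifs with hc1 hc2 hc2 <;> first | rfl | omega

-- the Pascal-style recurrence, valid for every kk ≥ 1 (both sides empty past m'+1)
theorem pvGen_rec (m' kk : Nat) (h1 : 1 ≤ kk) :
    pvGen (m' + 1) (kk : Int)
      = (pvGen m' (kk : Int)).map (fun v => 2 * v)
        ++ (pvGen m' ((kk : Int) - 1)).map (fun v => 2 * v + 1) := by
  by_cases h : (kk : Int) ≤ (m' : Int) + 1
  · exact pvGen_succ m' kk (by exact_mod_cast h1) h
  · rw [pvGen_nil (by omega), pvGen_nil (by omega), pvGen_nil (by omega)]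
    rfl

-- the inner (descending j) loop turns the band of row-(m'-stage) entries into
-- row-(m'+1-stage) entries; entries below lo keep their last computed value
theorem pvInner_inv (kN nN m' : Nat) (hm : m' + 1 ≤ nN) (hkn : kN ≤ nN) :
    ∀ j, j ≤ min kN (m' + 1) →
      pvInnerLoop (max 1 (kN - (nN - (m' + 1)))) j ((List.range (kN + 1)).map
          (fun (i : Nat) => if j < i ∧ max 1 (kN - (nN - (m' + 1))) ≤ i
            then pvGen (m' + 1) (i : Int)
            else pvGen (min m' (nN - kN + i)) (i : Int)))
        = (List.range (kN + 1)).map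
          (fun (i : Nat) => if max 1 (kN - (nN - (m' + 1))) ≤ i
            then pvGen (m' + 1) (i : Int)
            else pvGen (min m' (nN - kN + i)) (i : Int)) := by
  intro j
  induction j with
  | zero =>
    intro _
    show (List.range (kN + 1)).map _ = _
    apply List.map_congr_left
    intro i hi
    by_cases hc : max 1 (kN - (nN - (m' + 1))) ≤ i
    · rw [if_pos ⟨by omega, hc⟩, if_pos hc]
    · rw [if_neg (by omega), if_neg hc]
  | succ j ih =>
    intro hj
    unfold pvInnerLoop
    by_cases hlo : j + 1 < max 1 (kN - (nN - (m' + 1)))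
    · rw [if_pos hlo]
      apply List.map_congr_left
      intro i hi
      by_cases hc : max 1 (kN - (nN - (m' + 1))) ≤ i
      · rw [if_pos ⟨by omega, hc⟩, if_pos hc]
      · rw [if_neg (by omega), if_neg hc]
    · rw [if_neg hlo]
      rw [pvGetD_map_range _ _ _ _ (by omega), pvGetD_map_range _ _ _ _ (by omega),
        pvSet_map_range]
      rw [if_neg (by omega : ¬ (j + 1 < j + 1 ∧ max 1 (kN - (nN - (m' + 1))) ≤ j + 1)),
        if_neg (by omega : ¬ (j + 1 < j ∧ max 1 (kN - (nN - (m' + 1))) ≤ j)),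
        show min m' (nN - kN + (j + 1)) = m' from by omega,
        show min m' (nN - kN + j) = m' from by omega]
      rw [show (fun (i : Nat) => if i = j + 1 then
              (pvGen m' ((j + 1 : Nat) : Int)).map (fun v => 2 * v)
                ++ (pvGen m' ((j : Nat) : Int)).map (fun v => 2 * v + 1)
            else if j + 1 < i ∧ max 1 (kN - (nN - (m' + 1))) ≤ i
              then pvGen (m' + 1) (i : Int)
              else pvGen (min m' (nN - kN + i)) (i : Int))
          = (fun (i : Nat) => if j < i ∧ max 1 (kN - (nN - (m' + 1))) ≤ i
              then pvGen (m' + 1) (i : Int)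
              else pvGen (min m' (nN - kN + i)) (i : Int)) from by
        funext i
        by_cases hi : i = j + 1
        · subst hi
          rw [if_pos rfl, if_pos ⟨by omega, by omega⟩]
          rw [pvGen_rec m' (j + 1) (by omega)]
          congr 2
          push_cast
          ring
        · rw [if_neg hi]
          by_cases hlt : j + 1 < i ∧ max 1 (kN - (nN - (m' + 1))) ≤ i
          · rw [if_pos hlt, if_pos ⟨by omega, hlt.2⟩]
          · by_cases hlt2 : j < i ∧ max 1 (kN - (nN - (m' + 1))) ≤ i
            · exact absurd ⟨by omega, hlt2.2⟩ hlt
            · rw [if_neg hlt, if_neg hlt2]]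
      exact ih (by omega)

-- after M outer iterations row i holds its last computed stage min M (nN-kN+i)
theorem pvOuter_inv (kN nN : Nat) (hkn : kN ≤ nN) :
    ∀ M, M ≤ nN → pvOuterLoop kN nN ([[(0 : Int)]] ++ List.replicate kN []) M
      = (List.range (kN + 1)).map
          (fun (i : Nat) => pvGen (min M (nN - kN + i)) (i : Int)) := by
  intro M
  induction M with
  | zero =>
    intro _
    show ([[(0 : Int)]] ++ List.replicate kN []) = _
    apply List.ext_getElem (by simp [Nat.add_comm])
    intro i h1 h2
    simp only [List.getElem_map, List.getElem_range, Nat.zero_min]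
    rcases Nat.eq_zero_or_pos i with hi | hi
    · subst hi
      rw [List.getElem_append_left (by simp)]
      simp [pvGen_zero]
    · rw [List.getElem_append_right (by simpa using hi)]
      rw [List.getElem_replicate, pvGen_nil (by omega)]
  | succ M ih =>
    intro hM
    show pvInnerLoop _ (min kN (M + 1)) (pvOuterLoop kN nN _ M) = _
    rw [ih (by omega)]
    rw [show (List.range (kN + 1)).map
          (fun (i : Nat) => pvGen (min M (nN - kN + i)) (i : Int))
        = (List.range (kN + 1)).map
          (fun (i : Nat) => if min kN (M + 1) < i ∧ max 1 (kN - (nN - (M + 1))) ≤ i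
            then pvGen (M + 1) (i : Int)
            else pvGen (min M (nN - kN + i)) (i : Int)) from by
      apply List.map_congr_left
      intro i hi
      rw [List.mem_range] at hi
      by_cases hc : min kN (M + 1) < i ∧ max 1 (kN - (nN - (M + 1))) ≤ i
      · rw [if_pos hc, pvGen_nil (by omega), pvGen_nil (by omega)]
      · rw [if_neg hc]]
    rw [pvInner_inv kN nN M hM hkn (min kN (M + 1)) (le_refl _)]
    apply List.map_congr_left
    intro i hi
    rw [List.mem_range] at hi
    by_cases hc : max 1 (kN - (nN - (M + 1))) ≤ i
    · rw [if_pos hc, show min (M + 1) (nN - kN + i) = M + 1 from by omega]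
    · rcases Nat.eq_zero_or_pos i with hi0 | hi0
      · subst hi0
        rw [if_neg hc]
        simp [pvGen_zero]
      · rw [if_neg hc, show min (M + 1) (nN - kN + i) = min M (nN - kN + i) from by omega]

-- B's DP computes pvGen at the clamped k
theorem pvAlt_eq (n r : Int) (h2 : 2 ≤ n) :
    generate_pob_values_alt n r = pvGen n.toNat ((min (max r 0) n).toNat : Int) := by
  unfold generate_pob_values_alt
  simp only
  rw [if_neg (by omega : ¬ (min (max r 0) n < 0))]
  by_cases h0 : min (max r 0) n = 0
  · rw [if_pos h0, h0]
    simp [pvGen_zero]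
  · rw [if_neg h0,
      pvOuter_inv (min (max r 0) n).toNat n.toNat (by omega) n.toNat (le_refl _),
      pvGetD_map_range _ _ _ _ (by omega),
      show min n.toNat (n.toNat - (min (max r 0) n).toNat + (min (max r 0) n).toNat)
        = n.toNat from by omega]

-- index lemmas
theorem pvGetC_nat (B : List Char) (p : Nat) : pvGetC B (p : Int) = B.getD p ' ' := by
  simp [pvGetC]

-- scan characterisation, non-final stop: from pair (p, p+1), the pattern ahead is
-- z zeros, then a ≥ 1 ones, then a zero that is not in the break position
theorem pvScan_stop :
    ∀ (fuel : Nat) (B : List Char) (n noz : Int) (p z a : Nat),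
      (∀ q : Nat, p ≤ q → q < p + z → pvGetC B (q : Int) = '0') →
      (∀ q : Nat, p + z ≤ q → q < p + z + a → pvGetC B (q : Int) = '1') →
      pvGetC B ((p + z + a : Nat) : Int) = '0' →
      1 ≤ a → ((p + z + a : Nat) : Int) ≤ n - 1 → z + a ≤ fuel →
      pvScan B n fuel noz (p : Int) ((p : Int) + 1)
        = (noz + z, ((p : Int) + z + a) - 1, ((p : Int) + z + a), false) := by
  intro fuel
  induction fuel with
  | zero => intro B n noz p z a _ _ _ ha hn hf; omega
  | succ fuel ih =>
    intro B n noz p z a h0 h1 hend ha hn hf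
    push_cast at hn
    rcases Nat.eq_zero_or_pos z with hz | hz
    · subst hz
      have hp : pvGetC B (p : Int) = '1' := h1 p (by omega) (by omega)
      rcases Nat.lt_or_ge 1 a with ha2 | ha2
      · -- a ≥ 2 : B[p] = '1', B[p+1] = '1'
        have hp1 : pvGetC B ((p : Int) + 1) = '1' := by
          have h := h1 (p + 1) (by omega) (by omega); push_cast at h; exact h
        have hne : ¬ ((p : Int) + 1 = n - 1) := by omega
        unfold pvScan
        simp only [hp, hp1]
        rw [if_pos (Or.inl trivial), if_neg (by decide : ¬ (('1' : Char) = '0')),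
          if_neg hne]
        have hrec := ih B n noz (p + 1) 0 (a - 1)
          (by intro q hq1 hq2; omega)
          (by intro q hq1 hq2; exact h1 q (by omega) (by omega))
          (by have he : p + 1 + 0 + (a - 1) = p + 0 + a := by omega
              rw [he]; exact hend)
          (by omega) (by push_cast; omega) (by omega)
        push_cast at hrec
        rw [hrec]
        simp only [Prod.mk.injEq]
        exact ⟨by omega, by omega, by omega, by simp⟩
      · -- a = 1 : B[p] = '1', B[p+1] = '0' → condition false
        have ha1 : a = 1 := by omega
        subst ha1
        have hp1 : pvGetC B ((p : Int) + 1) = '0' := by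
          have h := hend; push_cast at h; exact h
        unfold pvScan
        simp only [hp, hp1]
        rw [if_neg (by decide : ¬ ((('0' : Char) = '1') ∨ (('1' : Char) = '0')))]
        simp only [Prod.mk.injEq]
        exact ⟨by omega, by omega, by omega, by simp⟩
    · -- z ≥ 1 : B[p] = '0'
      have hp : pvGetC B (p : Int) = '0' := h0 p (by omega) (by omega)
      have hne : ¬ ((p : Int) + 1 = n - 1) := by omega
      unfold pvScan
      simp only [hp]
      rw [if_pos (Or.inr trivial), if_pos trivial, if_neg hne]
      have hrec := ih B n (noz + 1) (p + 1) (z - 1) a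
        (by intro q hq1 hq2; exact h0 q (by omega) (by omega))
        (by intro q hq1 hq2; exact h1 q (by omega) (by omega))
        (by have he : p + 1 + (z - 1) + a = p + z + a := by omega
            rw [he]; exact hend)
        ha (by push_cast; omega) (by omega)
      push_cast at hrec
      rw [hrec]
      simp only [Prod.mk.injEq]
      exact ⟨by omega, by omega, by omega, by simp⟩

-- scan characterisation, final break: ahead of pair (p, p+1) the string is zeros
-- then ones up to its very end, so j walks to n-1 and done is set
theorem pvScan_done :
    ∀ (fuel : Nat) (B : List Char) (n noz : Int) (p z a : Nat),
      (∀ q : Nat, p ≤ q → q < p + z → pvGetC B (q : Int) = '0') →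
      (∀ q : Nat, p + z ≤ q → q < p + z + a → pvGetC B (q : Int) = '1') →
      ((p + z + a : Nat) : Int) = n → (p : Int) + 1 ≤ n - 1 → z + a ≤ fuel →
      (pvScan B n fuel noz (p : Int) ((p : Int) + 1)).2.2.2 = true := by
  intro fuel
  induction fuel with
  | zero => intro B n noz p z a _ _ hn hp hf; simp [pvScan]
  | succ fuel ih =>
    intro B n noz p z a h0 h1 hn hpn hf
    push_cast at hn
    have hza : 2 ≤ z + a := by omega
    rcases Nat.eq_zero_or_pos z with hz | hz
    · subst hz
      have hp : pvGetC B (p : Int) = '1' := h1 p (by omega) (by omega)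
      have hp1 : pvGetC B ((p : Int) + 1) = '1' := by
        have h := h1 (p + 1) (by omega) (by omega); push_cast at h; exact h
      unfold pvScan
      simp only [hp, hp1]
      rw [if_pos (Or.inl trivial), if_neg (by decide : ¬ (('1' : Char) = '0'))]
      by_cases hlast : (p : Int) + 1 = n - 1
      · rw [if_pos hlast]
      · rw [if_neg hlast]
        have hrec := ih B n noz (p + 1) 0 (a - 1)
          (by intro q hq1 hq2; omega)
          (by intro q hq1 hq2; exact h1 q (by omega) (by omega))
          (by push_cast; omega) (by push_cast; omega) (by omega)
        push_cast at hrec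
        exact hrec
    · have hp : pvGetC B (p : Int) = '0' := h0 p (by omega) (by omega)
      unfold pvScan
      simp only [hp]
      rw [if_pos (Or.inr trivial), if_pos trivial]
      by_cases hlast : (p : Int) + 1 = n - 1
      · rw [if_pos hlast]
      · rw [if_neg hlast]
        have hrec := ih B n (noz + 1) (p + 1) (z - 1) a
          (by intro q hq1 hq2; exact h0 q (by omega) (by omega))
          (by intro q hq1 hq2; exact h1 q (by omega) (by omega))
          (by push_cast; omega) (by push_cast; omega) (by omega)
        push_cast at hrec
        exact hrec

theorem pvSet_append (x y : List Char) (q : Nat) (c : Char) :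
    (x ++ y).set (x.length + q) c = x ++ y.set q c := by
  simp

theorem pvGetD_shape (z a : Nat) (t : List Char) (q : Nat) :
    (List.replicate z '0' ++ (List.replicate a '1' ++ t)).getD q ' '
      = if q < z then '0' else if q < z + a then '1' else t.getD (q - z - a) ' ' := by
  simp [List.getD, List.getElem?_append, List.getElem?_replicate]
  split_ifs <;> first | rfl | omega

theorem pvRep_cons (n : Nat) (c : Char) (t : List Char) :
    List.replicate n c ++ c :: t = List.replicate (n + 1) c ++ t := by
  rw [List.replicate_succ', List.append_assoc]; rfl

-- while i >= j: B[i] = '0': blanks the segment that is Y in B = X ++ Y ++ t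
theorem pvZeroLoop_shape :
    ∀ (Y X t : List Char),
      pvZeroLoop Y.length (X ++ Y ++ t) ((X.length : Int) + Y.length - 1) (X.length : Int)
        = (X ++ List.replicate Y.length '0' ++ t, (X.length : Int) - 1) := by
  intro Y
  induction Y using List.reverseRecOn with
  | nil => intro X t; simp [pvZeroLoop]
  | append_singleton Y' y ih =>
    intro X t
    have hlen : (Y' ++ [y]).length = Y'.length + 1 := by simp
    rw [hlen]
    unfold pvZeroLoop
    rw [if_pos (by push_cast; omega)]
    simp only [Nat.cast_add, Nat.cast_one]
    have hset : pvSetC (X ++ (Y' ++ [y]) ++ t)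
        ((X.length : Int) + (Y'.length + 1) - 1) '0' = (X ++ Y') ++ ('0' :: t) := by
      unfold pvSetC
      rw [if_pos (by push_cast; omega)]
      have hidx : (((X.length : Int) + (Y'.length + 1) - 1)).toNat
          = (X ++ Y').length + 0 := by simp; omega
      rw [hidx, show X ++ (Y' ++ [y]) ++ t = (X ++ Y') ++ ([y] ++ t) by simp,
        pvSet_append]
      simp
    rw [hset]
    have harg : (X.length : Int) + (Y'.length + 1) - 1 - 1
        = (X.length : Int) + Y'.length - 1 := by ring
    rw [harg]
    have := ih X ('0' :: t)
    rw [show (X ++ Y') ++ ('0' :: t) = X ++ Y' ++ ('0' :: t) by simp, this]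
    simp [List.replicate_succ']

-- while i >= 0: B[i] = '1': fills the whole prefix X in B = X ++ t
theorem pvOneLoop_shape :
    ∀ (X : List Char) (t : List Char) (fuel : Nat), X.length ≤ fuel →
      pvOneLoop fuel (X ++ t) ((X.length : Int) - 1) = List.replicate X.length '1' ++ t := by
  intro X
  induction X using List.reverseRecOn with
  | nil => intro t fuel _; cases fuel <;> simp [pvOneLoop]
  | append_singleton X' y ih =>
    intro t fuel hf
    have hlen : (X' ++ [y]).length = X'.length + 1 := by simp
    rw [hlen] at hf ⊢
    obtain ⟨f, rfl⟩ : ∃ f, fuel = f + 1 := ⟨fuel - 1, by omega⟩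
    unfold pvOneLoop
    rw [if_pos (by push_cast; omega)]
    simp only [Nat.cast_add, Nat.cast_one]
    have hset : pvSetC (X' ++ [y] ++ t) ((X'.length : Int) + 1 - 1) '1'
        = X' ++ ('1' :: t) := by
      unfold pvSetC
      rw [if_pos (by push_cast; omega)]
      have hidx : (((X'.length : Int) + 1 - 1)).toNat = X'.length + 0 := by simp
      rw [hidx, show X' ++ [y] ++ t = X' ++ ([y] ++ t) by simp, pvSet_append]
      simp
    rw [hset, show (X'.length : Int) + 1 - 1 - 1 = (X'.length : Int) - 1 by ring,
      ih ('1' :: t) f (by omega), pvRep_cons]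

-- one unfolding of the outer while, exposing A's loop-body pipeline
theorem pvLoop_succ (n : Int) (fuel : Nat) (B : List Char) :
    pvLoop n (fuel + 1) B
      = (let s := pvScan B n (n.toNat + 1) 0 0 1
         let B1 := pvSetC B s.2.2.1 '1'
         let zr := pvZeroLoop ((s.2.1 - (s.2.1 - s.1)).toNat + 1) B1 s.2.1 (s.2.1 - s.1)
         let B3 := pvOneLoop (zr.2.toNat + 1) zr.1 zr.2
         if s.2.2.2 then [pvBin B] else pvBin B :: pvLoop n fuel B3) := rfl

-- one body of A's outer while on a non-final configuration 0^z 1^a 0 t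
theorem pvStep (z a : Nat) (t : List Char) (n : Int) (fuel : Nat) (ha : 1 ≤ a)
    (hn : n = ((z + a + 1 + t.length : Nat) : Int)) :
    pvLoop n (fuel + 1) (List.replicate z '0' ++ (List.replicate a '1' ++ '0' :: t))
      = pvBin (List.replicate z '0' ++ (List.replicate a '1' ++ '0' :: t))
        :: pvLoop n fuel
            (List.replicate (a - 1) '1' ++ (List.replicate (z + 1) '0' ++ '1' :: t)) := by
  set B := List.replicate z '0' ++ (List.replicate a '1' ++ '0' :: t) with hB
  have hgets : ∀ q : Nat, q < z + a + 1 → pvGetC B (q : Int)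
      = (if q < z then '0' else if q < z + a then '1' else '0') := by
    intro q hq
    rw [pvGetC_nat, hB, pvGetD_shape]
    split_ifs with c1 c2 <;> first | rfl | (simp [List.getD]; omega) | skip
    have : q - z - a = 0 := by omega
    rw [this]; rfl
  have hscan := pvScan_stop (n.toNat + 1) B n 0 0 z a
    (by intro q hq1 hq2; rw [hgets q (by omega), if_pos (by omega)])
    (by intro q hq1 hq2
        rw [hgets q (by omega)]
        rw [if_neg (by omega), if_pos (by omega)])
    (by simp only [Nat.zero_add]
        rw [hgets (z + a) (by omega), if_neg (by omega), if_neg (by omega)])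
    ha (by push_cast; omega) (by omega)
  have hscan' : pvScan B n (n.toNat + 1) 0 0 1
      = ((z : Int), (z : Int) + a - 1, (z : Int) + a, false) := by
    rw [show ((0 : Nat) : Int) = (0 : Int) by simp,
      show ((0 : Int)) + 1 = (1 : Int) by ring] at hscan
    rw [hscan]; norm_num
  rw [pvLoop_succ, hscan']
  simp only
  set P := List.replicate z '0' ++ List.replicate a '1' with hP
  have hPlen : P.length = z + a := by simp [hP]
  have hX : (P.take (a - 1)).length = a - 1 := by simp [hPlen]; omega
  have hY : (P.drop (a - 1)).length = z + 1 := by simp [hPlen]; omega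
  have hB1 : pvSetC B ((z : Int) + a) '1' = P ++ '1' :: t := by
    unfold pvSetC
    rw [if_pos (by omega)]
    have hidx : ((z : Int) + a).toNat = P.length + 0 := by rw [hPlen]; omega
    rw [hB, hidx, show List.replicate z '0' ++ (List.replicate a '1' ++ '0' :: t)
        = P ++ ('0' :: t) by simp [hP], pvSet_append]
    rfl
  have hz0' : pvZeroLoop (z + 1) (P ++ '1' :: t) ((z : Int) + a - 1) ((a : Int) - 1)
      = (P.take (a - 1) ++ List.replicate (z + 1) '0' ++ '1' :: t, ((a : Int) - 1) - 1) := by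
    have h := pvZeroLoop_shape (P.drop (a - 1)) (P.take (a - 1)) ('1' :: t)
    rw [hX, hY, List.take_append_drop] at h
    rw [show ((a - 1 : Nat) : Int) + ((z + 1 : Nat) : Int) - 1 = (z : Int) + a - 1
        from by omega] at h
    rw [show ((a - 1 : Nat) : Int) = (a : Int) - 1 from by omega] at h
    exact h
  have hOne' : pvOneLoop (((a : Int) - 1 - 1).toNat + 1)
        (P.take (a - 1) ++ (List.replicate (z + 1) '0' ++ '1' :: t)) ((a : Int) - 1 - 1)
      = List.replicate (a - 1) '1' ++ (List.replicate (z + 1) '0' ++ '1' :: t) := by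
    have h := pvOneLoop_shape (P.take (a - 1)) (List.replicate (z + 1) '0' ++ '1' :: t)
      (((a : Int) - 1 - 1).toNat + 1) (by rw [hX]; omega)
    rw [hX] at h
    rw [show ((a - 1 : Nat) : Int) - 1 = (a : Int) - 1 - 1 from by omega] at h
    exact h
  rw [show ((z : Int) + ↑a - 1 - ((z : Int) + ↑a - 1 - ↑z)) = ((z : Nat) : Int) from by ring,
    Int.toNat_natCast,
    show ((z : Int) + ↑a - 1 - ↑z) = (a : Int) - 1 from by ring,
    hB1, hz0', List.append_assoc, hOne']
  simp
-- the final configuration 0^z 1^a: the scan breaks with done set, one value emitted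
theorem pvLast (z a : Nat) (n : Int) (fuel : Nat)
    (hn : n = ((z + a : Nat) : Int)) (h2 : 2 ≤ z + a) :
    pvLoop n (fuel + 1) (List.replicate z '0' ++ List.replicate a '1')
      = [pvBin (List.replicate z '0' ++ List.replicate a '1')] := by
  set B := List.replicate z '0' ++ List.replicate a '1' with hB
  have hBs : B = List.replicate z '0' ++ (List.replicate a '1' ++ []) := by simp [hB]
  have hgets : ∀ q : Nat, q < z + a → pvGetC B (q : Int)
      = (if q < z then '0' else '1') := by
    intro q hq
    rw [pvGetC_nat, hBs, pvGetD_shape]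
    split_ifs <;> first | rfl | omega
  have hdone := pvScan_done (n.toNat + 1) B n 0 0 z a
    (by intro q hq1 hq2; rw [hgets q (by omega), if_pos (by omega)])
    (by intro q hq1 hq2; rw [hgets q (by omega), if_neg (by omega)])
    (by omega) (by omega) (by omega)
  rw [show ((0 : Nat) : Int) = (0 : Int) by simp,
    show ((0 : Int)) + 1 = (1 : Int) by ring] at hdone
  rw [pvLoop_succ]
  simp only [hdone]
  simp

-- the walk: A's loop runs through pvConfigs m k (each extended by the fixed tail t)
theorem pvWalk : ∀ (m k : Nat) (t : List Char) (fuel : Nat) (n : Int),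
    k ≤ m → n = ((m + t.length : Nat) : Int) →
    pvLoop n (fuel + (pvConfigs m k).length)
        (List.replicate k '1' ++ List.replicate (m - k) '0' ++ t)
      = ((pvConfigs m k).dropLast.map (fun c => pvBin (c ++ t)))
        ++ pvLoop n (fuel + 1) (List.replicate (m - k) '0' ++ List.replicate k '1' ++ t) := by
  intro m
  induction m with
  | zero =>
    intro k t fuel n hk hn
    interval_cases k
    simp [pvConfigs_zero]
  | succ m ih =>
    intro k t fuel n hk hn
    rcases Nat.eq_zero_or_pos k with hk0 | hk0
    · subst hk0
      simp [pvConfigs_zero]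
    · rw [pvConfigs_succ m k (by omega)]
      rcases Nat.lt_or_ge m k with hkm | hkm
      · -- k = m + 1 : the '0'-group is empty
        have hk1 : k = m + 1 := by omega
        subst hk1
        rw [pvConfigs_big (by omega : m < m + 1)]
        simp only [List.map_nil, List.nil_append, List.length_map, Nat.add_sub_cancel]
        have hstr : List.replicate (m + 1) '1' ++ List.replicate (m + 1 - (m + 1)) '0' ++ t
            = List.replicate m '1' ++ List.replicate (m - m) '0' ++ ('1' :: t) := by
          simp [pvRep_cons]
        rw [hstr, ih m ('1' :: t) fuel n (by omega) (by push_cast [List.length_cons] at hn ⊢; omega)]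
        rw [show List.map (fun c => pvBin (c ++ t))
              ((List.map (fun x => x ++ ['1']) (pvConfigs m m)).dropLast)
            = List.map (fun c => pvBin (c ++ '1' :: t)) (pvConfigs m m).dropLast from by
          rw [← List.map_dropLast, List.map_map]
          apply List.map_congr_left
          intro c _
          simp]
        rw [show pvLoop n (fuel + 1)
              (List.replicate (m + 1 - (m + 1)) '0' ++ List.replicate (m + 1) '1' ++ t)
            = pvLoop n (fuel + 1)
              (List.replicate (m - m) '0' ++ List.replicate m '1' ++ '1' :: t) from by
          congr 1
          simp [pvRep_cons]]
      · -- 1 ≤ k ≤ m : '0'-group, crossing step, '1'-group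
        have hlen : ((pvConfigs m k).map (· ++ ['0'])
              ++ (pvConfigs m (k - 1)).map (· ++ ['1'])).length
            = (pvConfigs m (k - 1)).length + (pvConfigs m k).length := by
          simp; omega
        rw [hlen]
        have hstr : List.replicate k '1' ++ List.replicate (m + 1 - k) '0' ++ t
            = List.replicate k '1' ++ List.replicate (m - k) '0' ++ ('0' :: t) := by
          simp only [List.append_assoc]
          rw [show m + 1 - k = (m - k) + 1 by omega, ← pvRep_cons]
        rw [show fuel + ((pvConfigs m (k - 1)).length + (pvConfigs m k).length)
            = (fuel + (pvConfigs m (k - 1)).length) + (pvConfigs m k).length by omega,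
          hstr, ih k ('0' :: t) (fuel + (pvConfigs m (k - 1)).length) n hkm
            (by push_cast [List.length_cons] at hn ⊢; omega)]
        -- crossing step on 0^(m-k) 1^k 0 t
        have hcross := pvStep (m - k) k t n (fuel + (pvConfigs m (k - 1)).length)
          (by omega) (by push_cast [List.length_cons] at hn ⊢; omega)
        rw [show List.replicate (m - k) '0' ++ (List.replicate k '1' ++ '0' :: t)
            = List.replicate (m - k) '0' ++ List.replicate k '1' ++ '0' :: t by simp] at hcross
        rw [show List.replicate (k - 1) '1' ++ (List.replicate (m - k + 1) '0' ++ '1' :: t)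
            = List.replicate (k - 1) '1' ++ List.replicate (m - (k - 1)) '0' ++ ('1' :: t) by
          rw [show m - (k - 1) = m - k + 1 by omega]; simp] at hcross
        rw [hcross, ih (k - 1) ('1' :: t) fuel n (by omega)
          (by push_cast [List.length_cons] at hn ⊢; omega)]
        -- assemble
        have hA0 := pvConfigs_concat (m := m) (k := k) hkm
        have hA1ne : (pvConfigs m (k - 1)).map (· ++ ['1']) ≠ [] := by
          simpa using pvConfigs_ne_nil (m := m) (k := k - 1) (by omega)
        rw [List.dropLast_append_of_ne_nil hA1ne, List.map_append]
        rw [show List.map (fun c => pvBin (c ++ t)) ((pvConfigs m k).map (· ++ ['0']))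
            = List.map (fun c => pvBin (c ++ '0' :: t)) (pvConfigs m k) from by
          rw [List.map_map]
          apply List.map_congr_left
          intro c _
          simp]
        rw [show List.map (fun c => pvBin (c ++ t))
              (((pvConfigs m (k - 1)).map (· ++ ['1'])).dropLast)
            = List.map (fun c => pvBin (c ++ '1' :: t)) (pvConfigs m (k - 1)).dropLast from by
          rw [← List.map_dropLast, List.map_map]
          apply List.map_congr_left
          intro c _
          simp]
        rw [show pvLoop n (fuel + 1)
              (List.replicate (m - (k - 1)) '0' ++ List.replicate (k - 1) '1' ++ '1' :: t)
            = pvLoop n (fuel + 1)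
              (List.replicate (m + 1 - k) '0' ++ List.replicate k '1' ++ t) from by
          congr 1
          rw [show m - (k - 1) = m + 1 - k by omega, List.append_assoc, List.append_assoc,
            show List.replicate (k - 1) '1' ++ '1' :: t = List.replicate k '1' ++ t from by
              rw [pvRep_cons]; congr 2; omega]]
        conv_rhs => rw [hA0]
        rw [List.map_append]
        simp [List.append_assoc]

-- ===== VERDICT (by name: the statement is the Claim_ definition above) =====
-- initial string: '1' * min(max(r,0),n) followed by '0's
theorem pvBuildB_eq (n r : Int) (h : 0 ≤ n) :
    pvBuildB n r = List.replicate (min (max r 0) n).toNat '1'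
      ++ List.replicate (n.toNat - (min (max r 0) n).toNat) '0' := by
  set k := (min (max r 0) n).toNat with hk
  have hkm : k ≤ n.toNat := by omega
  unfold pvBuildB
  rw [PySem.List.pyRange_one, List.map_map]
  apply List.ext_getElem
  · simp; omega
  · intro q hq1 hq2
    simp only [List.getElem_map, List.getElem_range]
    have hqm : q < n.toNat := by simpa using hq1
    rcases Nat.lt_or_ge q k with hcase | hcase
    · rw [List.getElem_append_left (by simpa using hcase), List.getElem_replicate]
      simp only [Function.comp]
      rw [if_pos (by omega)]
    · rw [List.getElem_append_right (by simpa using hcase), List.getElem_replicate]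
      simp only [Function.comp]
      rw [if_neg (by omega)]

theorem generate_pob_values_spec : Claim_equal_generate_pob_values := by
  intro n r _ hpre
  have h2 : 2 ≤ n := hpre
  unfold Spec_generate_pob_values generate_pob_values
  rw [pvAlt_eq n r h2]
  set m := n.toNat with hm
  set kI := min (max r 0) n with hkI
  set k := kI.toNat with hk
  have hkm : k ≤ m := by omega
  have hlen := pvConfigs_length_le m k
  have hlen1 : 1 ≤ (pvConfigs m k).length :=
    List.length_pos_of_ne_nil (pvConfigs_ne_nil hkm)
  have hfuel : 2 ^ m = (2 ^ m - (pvConfigs m k).length) + (pvConfigs m k).length := by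
    omega
  rw [pvBuildB_eq n r (by omega), hfuel]
  have hW := pvWalk m k [] (2 ^ m - (pvConfigs m k).length) n hkm (by simp; omega)
  simp only [List.append_nil] at hW
  rw [hW]
  have hL := pvLast (m - k) k n (2 ^ m - (pvConfigs m k).length)
    (by push_cast; omega) (by omega)
  rw [hL]
  have hcat : List.map (fun c => pvBin c) (pvConfigs m k).dropLast
        ++ [pvBin (List.replicate (m - k) '0' ++ List.replicate k '1')]
      = (pvConfigs m k).map pvBin := by
    conv_rhs => rw [pvConfigs_concat hkm]
    rw [List.map_append]
    rfl
  rw [hcat, pvGen_eq_map hkm]
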